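-- pv_equiv track=rewrite | github.com/Vamsi2511999/AI-Music-systems | music_ai/hindustani_multi_model_pipeline.py | split_phrases
-- ===== SOURCE A (Python) =====
-- from typing import DefaultDict, Dict, Iterable, List, Sequence, Tuple
--
-- SWARA_ORDER = ["S", "r", "R", "g", "G", "m", "M", "P", "d", "D", "n", "N"]
--
-- SEP_TOKEN = "<SEP>"
--
-- def split_phrases(tokens: Sequence[str]) -> List[List[str]]:
--     phrases: List[List[str]] = []
--     current: List[str] = []
--     for token in tokens:
--         if token == SEP_TOKEN:
--             if current:
--                 phrases.append(current)
--                 current = []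
--             continue
--         if token in SWARA_ORDER:
--             current.append(token)
--     if current:
--         phrases.append(current)
--     return phrases
-- ===== SOURCE B (Python) =====
-- from typing import Iterable, List, Sequence
--
-- SWARA_ORDER = ["S", "r", "R", "g", "G", "m", "M", "P", "d", "D", "n", "N"]
--
-- SEP_TOKEN = "<SEP>"
--
--
-- def _runs(tokens: Sequence[str]) -> Iterable[List[str]]:
--     """Split the token stream on SEP_TOKEN into runs (empty runs included)."""
--     run: List[str] = []
--     for t in tokens:
--         if t == SEP_TOKEN:
--             yield run
--             run = []
--         else:
--             run.append(t)
--     yield run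
--
--
-- def split_phrases(tokens: Sequence[str]) -> List[List[str]]:
--     swaras = set(SWARA_ORDER)
--     filtered = ([t for t in run if t in swaras] for run in _runs(tokens))
--     return [p for p in filtered if p]
-- ===== Notes on version B (the rewrite author's own statement) =====
-- stated objective: idiomatic
-- what changed: A's single interleaved scan with a mutable 'current' accumulator is replaced by a split-then-filter-then-drop-empties pipeline: split the stream on SEP_TOKEN into runs, filter each run to swara tokens via a set, and keep only the non-empty results.
import Mathlib
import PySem

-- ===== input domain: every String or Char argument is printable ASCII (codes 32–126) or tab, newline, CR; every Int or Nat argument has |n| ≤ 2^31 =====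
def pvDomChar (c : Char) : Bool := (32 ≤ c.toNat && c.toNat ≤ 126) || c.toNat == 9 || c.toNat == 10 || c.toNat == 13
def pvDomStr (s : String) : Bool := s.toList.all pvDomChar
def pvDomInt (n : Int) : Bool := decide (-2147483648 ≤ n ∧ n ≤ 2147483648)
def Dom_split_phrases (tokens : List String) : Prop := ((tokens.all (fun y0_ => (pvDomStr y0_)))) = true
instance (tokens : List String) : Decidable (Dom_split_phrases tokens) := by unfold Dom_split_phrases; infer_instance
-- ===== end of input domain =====

-- B replaces A's interleaved scan-and-accumulate by a split-on-separator / filter-each-run / drop-empties pipeline (objective: idiomatic).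

-- ===== PORT A =====
def SWARA_ORDER : List String := ["S", "r", "R", "g", "G", "m", "M", "P", "d", "D", "n", "N"]
def SEP_TOKEN : String := "<SEP>"

-- A's loop: state = (phrases, current), finally append current if nonempty
def stepA (s : List (List String) × List String) (token : String) :
    List (List String) × List String :=
  if token == SEP_TOKEN then
    (if s.2 ≠ [] then (s.1 ++ [s.2], ([] : List String)) else s)
  else if SWARA_ORDER.contains token then (s.1, s.2 ++ [token])
  else s

def split_phrases (tokens : List String) : List (List String) :=
  let st := tokens.foldl stepA ([], [])
  if st.2 ≠ [] then st.1 ++ [st.2] else st.1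

-- ===== PORT B =====
def swaraSet : PySem.Set String := PySem.Set.ofList SWARA_ORDER

-- B's _runs generator: split on SEP_TOKEN, keeping empty runs; the pending run is yielded at the end
def runsB (tokens : List String) : List (List String) :=
  let st := tokens.foldl
    (fun (s : List (List String) × List String) t =>
      if t == SEP_TOKEN then (s.1 ++ [s.2], ([] : List String)) else (s.1, s.2 ++ [t]))
    ([], [])
  st.1 ++ [st.2]

def split_phrases_alt (tokens : List String) : List (List String) :=
  ((runsB tokens).map (fun run => run.filter (fun t => swaraSet.contains t))).filter
    (fun p => !p.isEmpty)

-- ===== PRECONDITION & SPEC =====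
def Spec_split_phrases (tokens : List String) (out : List (List String)) : Prop := out = split_phrases_alt tokens
instance (tokens : List String) (out : List (List String)) : Decidable (Spec_split_phrases tokens out) := by unfold Spec_split_phrases; infer_instance

-- ===== CLAIM (what is proved, stated in full; the proofs are below) =====
def Claim_equal_split_phrases : Prop := ∀ (tokens : List String), Dom_split_phrases tokens → Spec_split_phrases tokens (split_phrases tokens)

-- ===== LEMMAS AND PROOFS =====

def stepB (s : List (List String) × List String) (t : String) :
    List (List String) × List String :=
  if t == SEP_TOKEN then (s.1 ++ [s.2], ([] : List String)) else (s.1, s.2 ++ [t])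

-- the per-run filter used by B, and the image of a completed-runs list under B's last two passes
def filt (run : List String) : List String := run.filter (fun t => swaraSet.contains t)

def projA (rs : List (List String)) : List (List String) :=
  (rs.map filt).filter (fun p => !p.isEmpty)

lemma alt_eq (tokens : List String) :
    split_phrases_alt tokens =
      projA ((tokens.foldl stepB ([], [])).1 ++ [(tokens.foldl stepB ([], [])).2]) := rfl

lemma filt_append_single (r : List String) (t : String) :
    filt (r ++ [t]) = filt r ++ (if t ∈ SWARA_ORDER then [t] else []) := by
  have h : swaraSet = SWARA_ORDER := by decide
  simp only [filt, h, List.filter_append]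
  by_cases hs : t ∈ SWARA_ORDER <;> simp [hs]

lemma projA_append (rs : List (List String)) (r : List String) :
    projA (rs ++ [r]) = projA rs ++ (if filt r = [] then [] else [filt r]) := by
  unfold projA
  rw [List.map_append, List.filter_append]
  congr 1
  by_cases hr : filt r = []
  · rw [if_pos hr]; simp [hr]
  · rw [if_neg hr]
    have hne : (filt r).isEmpty = false := by simpa [List.isEmpty_iff] using hr
    simp [hne]

-- invariant: A's fold state is the filtered/cleaned image of B's fold state
lemma fold_inv (xs : List String) :
    ∀ (rs : List (List String)) (r : List String),
      List.foldl stepA (projA rs, filt r) xs =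
        (projA (List.foldl stepB (rs, r) xs).1, filt (List.foldl stepB (rs, r) xs).2) := by
  induction xs with
  | nil => intro rs r; rfl
  | cons t xs ih =>
    intro rs r
    rw [List.foldl_cons, List.foldl_cons]
    by_cases hsep : t = SEP_TOKEN
    · have hB : stepB (rs, r) t = (rs ++ [r], []) := by simp [stepB, hsep]
      rw [hB]
      by_cases hr : filt r = []
      · have hA : stepA (projA rs, filt r) t = (projA rs, filt r) := by
          simp [stepA, hsep, hr]
        rw [hA, hr]
        have h := ih (rs ++ [r]) []
        rw [projA_append, if_pos hr, List.append_nil] at h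
        exact h
      · have hA : stepA (projA rs, filt r) t = (projA rs ++ [filt r], []) := by
          simp [stepA, hsep, hr]
        rw [hA]
        have h := ih (rs ++ [r]) []
        rw [projA_append, if_neg hr] at h
        exact h
    · have hB : stepB (rs, r) t = (rs, r ++ [t]) := by simp [stepB, hsep]
      have hA : stepA (projA rs, filt r) t = (projA rs, filt (r ++ [t])) := by
        rw [filt_append_single]
        by_cases hs : t ∈ SWARA_ORDER <;> simp [stepA, hsep, hs]
      rw [hA, hB]
      exact ih rs (r ++ [t])

-- ===== VERDICT (by name: the statement is the Claim_ definition above) =====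
theorem split_phrases_spec : Claim_equal_split_phrases := by
  intro tokens _
  unfold Spec_split_phrases split_phrases
  rw [alt_eq]
  have h := fold_inv tokens [] []
  have h00 : projA [] = [] := rfl
  have h01 : filt [] = ([] : List String) := rfl
  rw [h00, h01] at h
  set st := tokens.foldl stepB ([], []) with hst
  rw [show (tokens.foldl (fun (s : List (List String) × List String) token => stepA s token)
        ([], [])) = tokens.foldl stepA ([], []) from rfl, h, projA_append]
  generalize filt st.2 = c
  by_cases hc : c = [] <;> simp [hc]
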